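-- pv_equiv track=rewrite | github.com/AdrianSuliga/WDI | Kolokwia/ex_1A_20.py | areTheyGood
-- ===== SOURCE A (Python) =====
-- def areTheyGood(n1, n2): # sprawdź czy 2 liczby są zgodne piątkowo
--     n1_5 = decTo5(n1)
--     n2_5 = decTo5(n2)
--     evenN1, evenN2 = 0, 0
--     while n1_5 != 0:
--         if n1_5 % 2 == 0: evenN1 += 1
--         n1_5 //= 10
--     while n2_5 != 0:
--         if n2_5 % 2 == 0: evenN2 += 1
--         n2_5 //= 10
--     if evenN1 == evenN2: return True
--     else: return False
--
-- def decTo5(n): # konwertuj liczbę dziesiętną na piątkową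
--     res, i = 0, 0
--     while n != 0:
--         res += (n % 5) * 10**i
--         i += 1
--         n //= 5
--     return res
-- ===== SOURCE B (Python) =====
-- def _even_base5_digits(n):
--     # count even digits of n written in base 5, directly, without
--     # materializing the base-5 representation as a decimal number
--     cnt = 0
--     while n > 0:
--         if n % 5 % 2 == 0:
--             cnt += 1
--         n //= 5
--     return cnt
--
-- def areTheyGood(n1, n2):
--     return _even_base5_digits(n1) == _even_base5_digits(n2)
-- ===== Notes on version B (the rewrite author's own statement) =====
-- stated objective: simpler
-- what changed: B counts even base-5 digits of each number in one direct loop (d = n % 5, n //= 5) and compares the two counts, instead of first encoding each number's base-5 digits into an intermediate decimal integer via decTo5 and then re-extracting decimal digits in a second loop.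
import Mathlib
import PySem

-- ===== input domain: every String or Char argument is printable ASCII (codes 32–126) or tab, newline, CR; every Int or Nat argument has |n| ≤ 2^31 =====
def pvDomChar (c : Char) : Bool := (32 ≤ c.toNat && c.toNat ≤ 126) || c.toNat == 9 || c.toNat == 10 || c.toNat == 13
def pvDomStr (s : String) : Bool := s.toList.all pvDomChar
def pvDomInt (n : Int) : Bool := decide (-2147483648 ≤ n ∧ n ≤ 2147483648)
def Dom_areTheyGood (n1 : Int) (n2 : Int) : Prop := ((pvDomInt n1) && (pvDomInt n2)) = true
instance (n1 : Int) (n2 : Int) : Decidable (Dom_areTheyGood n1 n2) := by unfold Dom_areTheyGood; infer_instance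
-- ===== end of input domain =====

-- B drops the intermediate decimal encoding of the base-5 digits (decTo5) and counts
-- even base-5 digits in one direct loop per number; objective: simpler.


-- ===== PORT A =====
-- 'while n != 0' in decTo5/areTheyGood is written as '0 < n': equivalent on Pre_
-- (n ≥ 0); on negative n the Python loops forever, which Pre_ excludes.
def decTo5Loop (n res : Int) (i : Nat) : Int :=
  if 0 < n then
    decTo5Loop (PySem.Int.floordiv n 5) (res + (PySem.Int.mod n 5) * 10 ^ i) (i + 1)
  else res
termination_by n.toNat
decreasing_by
  rename_i h
  rw [PySem.Int.floordiv_eq_ediv_of_pos (by omega)]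
  omega

def decTo5 (n : Int) : Int := decTo5Loop n 0 0

def countEvenLoop (m cnt : Int) : Int :=
  if 0 < m then
    countEvenLoop (PySem.Int.floordiv m 10)
      (if PySem.Int.mod m 2 = 0 then cnt + 1 else cnt)
  else cnt
termination_by m.toNat
decreasing_by
  rename_i h
  rw [PySem.Int.floordiv_eq_ediv_of_pos (by omega)]
  omega

def areTheyGood (n1 : Int) (n2 : Int) : Bool :=
  let n1_5 := decTo5 n1
  let n2_5 := decTo5 n2
  let evenN1 := countEvenLoop n1_5 0
  let evenN2 := countEvenLoop n2_5 0
  if evenN1 = evenN2 then true else false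

-- ===== PORT B =====
def evenBase5Digits (n cnt : Int) : Int :=
  if 0 < n then
    evenBase5Digits (PySem.Int.floordiv n 5)
      (if PySem.Int.mod (PySem.Int.mod n 5) 2 = 0 then cnt + 1 else cnt)
  else cnt
termination_by n.toNat
decreasing_by
  rename_i h
  rw [PySem.Int.floordiv_eq_ediv_of_pos (by omega)]
  omega

def areTheyGood_alt (n1 : Int) (n2 : Int) : Bool :=
  decide (evenBase5Digits n1 0 = evenBase5Digits n2 0)

-- ===== PRECONDITION & SPEC =====
-- Pre_ excludes negative inputs: on them Python A loops forever (n //= 5 never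
-- reaches 0 from below), so A returns no value there.
def Pre_areTheyGood (n1 : Int) (n2 : Int) : Prop := 0 ≤ n1 ∧ 0 ≤ n2
instance (n1 : Int) (n2 : Int) : Decidable (Pre_areTheyGood n1 n2) := by
  unfold Pre_areTheyGood; infer_instance
def pvWitness_areTheyGood : Int × Int := (12, 37)

def Spec_areTheyGood (n1 : Int) (n2 : Int) (out : Bool) : Prop := out = areTheyGood_alt n1 n2
instance (n1 : Int) (n2 : Int) (out : Bool) : Decidable (Spec_areTheyGood n1 n2 out) := by
  unfold Spec_areTheyGood; infer_instance

-- ===== CLAIM (what is proved, stated in full; the proofs are below) =====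
def Claim_equal_areTheyGood : Prop := ∀ (n1 : Int) (n2 : Int), Dom_areTheyGood n1 n2 → Pre_areTheyGood n1 n2 → Spec_areTheyGood n1 n2 (areTheyGood n1 n2)

-- ===== LEMMAS AND PROOFS =====

theorem decTo5Loop_shift (k : Nat) : ∀ (n res : Int) (i : Nat), n.toNat ≤ k →
    decTo5Loop n res i = res + decTo5Loop n 0 0 * 10 ^ i := by
  induction k with
  | zero =>
    intro n res i h
    have hn : ¬ 0 < n := by omega
    rw [decTo5Loop, if_neg hn]
    conv_rhs => rw [decTo5Loop, if_neg hn]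
    ring
  | succ k ih =>
    intro n res i h
    by_cases hn : 0 < n
    · have hdiv : (PySem.Int.floordiv n 5).toNat ≤ k := by
        rw [PySem.Int.floordiv_eq_ediv_of_pos (by omega)]; omega
      rw [decTo5Loop, if_pos hn, ih _ _ _ hdiv]
      conv_rhs => rw [decTo5Loop, if_pos hn, ih _ _ _ hdiv]
      ring
    · rw [decTo5Loop, if_neg hn]
      conv_rhs => rw [decTo5Loop, if_neg hn]
      ring

theorem decTo5_rec (n : Int) (h : 0 < n) :
    decTo5 n = PySem.Int.mod n 5 + 10 * decTo5 (PySem.Int.floordiv n 5) := by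
  unfold decTo5
  rw [decTo5Loop, if_pos h, decTo5Loop_shift (PySem.Int.floordiv n 5).toNat _ _ _ le_rfl]
  ring

theorem decTo5_nonneg (k : Nat) : ∀ n : Int, n.toNat ≤ k → 0 ≤ decTo5 n := by
  induction k with
  | zero =>
    intro n h
    unfold decTo5
    rw [decTo5Loop, if_neg (by omega : ¬ (0:Int) < n)]
  | succ k ih =>
    intro n h
    by_cases hn : 0 < n
    · rw [decTo5_rec n hn]
      have h5 := PySem.Int.mod_nonneg n (b := 5) (by omega)
      have hdiv : (PySem.Int.floordiv n 5).toNat ≤ k := by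
        rw [PySem.Int.floordiv_eq_ediv_of_pos (by omega)]; omega
      have := ih _ hdiv
      omega
    · unfold decTo5
      rw [decTo5Loop, if_neg hn]

theorem decTo5_pos (k : Nat) : ∀ n : Int, n.toNat ≤ k → 0 < n → 0 < decTo5 n := by
  induction k with
  | zero => intro n h h0; omega
  | succ k ih =>
    intro n h h0
    rw [decTo5_rec n h0]
    have h5 := PySem.Int.mod_nonneg n (b := 5) (by omega)
    have hdivnn : 0 ≤ PySem.Int.floordiv n 5 := by
      rw [PySem.Int.floordiv_eq_ediv_of_pos (by omega)]; omega
    by_cases hq : PySem.Int.floordiv n 5 = 0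
    · have hmod : PySem.Int.mod n 5 = n := by
        have := PySem.Int.floordiv_mul_add_mod n 5
        rw [hq] at this; omega
      have h0' : 0 ≤ decTo5 (PySem.Int.floordiv n 5) :=
        decTo5_nonneg (PySem.Int.floordiv n 5).toNat _ le_rfl
      omega
    · have hq1 : 0 < PySem.Int.floordiv n 5 := lt_of_le_of_ne hdivnn (Ne.symm hq)
      have hdiv : (PySem.Int.floordiv n 5).toNat ≤ k := by
        rw [PySem.Int.floordiv_eq_ediv_of_pos (by omega)]; omega
      have := ih _ hdiv hq1
      omega

theorem count_eq_evenBase5 (k : Nat) : ∀ (n cnt : Int), n.toNat ≤ k → 0 ≤ n →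
    countEvenLoop (decTo5 n) cnt = evenBase5Digits n cnt := by
  induction k with
  | zero =>
    intro n cnt h h0
    have hn : n = 0 := by omega
    subst hn
    unfold decTo5
    rw [decTo5Loop, if_neg (by omega), countEvenLoop, if_neg (by omega),
      evenBase5Digits, if_neg (by omega)]
  | succ k ih =>
    intro n cnt h h0
    by_cases hn : 0 < n
    · have hd0 : 0 ≤ PySem.Int.mod n 5 := PySem.Int.mod_nonneg n (by omega)
      have hd5 : PySem.Int.mod n 5 < 5 := PySem.Int.mod_lt n (by omega)
      have hdiv : (PySem.Int.floordiv n 5).toNat ≤ k := by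
        rw [PySem.Int.floordiv_eq_ediv_of_pos (by omega)]; omega
      have hdivnn : 0 ≤ PySem.Int.floordiv n 5 := by
        rw [PySem.Int.floordiv_eq_ediv_of_pos (by omega)]; omega
      have hm : 0 ≤ decTo5 (PySem.Int.floordiv n 5) :=
        decTo5_nonneg _ _ hdiv
      rw [decTo5_rec n hn]
      set d := PySem.Int.mod n 5 with hd
      set m := decTo5 (PySem.Int.floordiv n 5) with hmdef
      have hpos : 0 < d + 10 * m := by
        by_cases hq : PySem.Int.floordiv n 5 = 0
        · have : d = n := by
            have := PySem.Int.floordiv_mul_add_mod n 5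
            rw [hq] at this; omega
          omega
        · have hq1 : 0 < PySem.Int.floordiv n 5 := lt_of_le_of_ne hdivnn (Ne.symm hq)
          have : 0 < m := decTo5_pos (PySem.Int.floordiv n 5).toNat _ le_rfl hq1
          omega
      rw [countEvenLoop, if_pos hpos]
      have hfd : PySem.Int.floordiv (d + 10 * m) 10 = m := by
        rw [PySem.Int.floordiv_eq_ediv_of_pos (by omega)]; omega
      have hmod : PySem.Int.mod (d + 10 * m) 2 = PySem.Int.mod d 2 := by
        rw [PySem.Int.mod_eq_emod_of_pos (by omega), PySem.Int.mod_eq_emod_of_pos (by omega)]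
        omega
      rw [hfd, hmod, ih _ _ hdiv hdivnn]
      conv_rhs => rw [evenBase5Digits, if_pos hn]
    · have hn0 : n = 0 := by omega
      subst hn0
      unfold decTo5
      rw [decTo5Loop, if_neg (by omega), countEvenLoop, if_neg (by omega),
        evenBase5Digits, if_neg (by omega)]

-- ===== VERDICT (by name: the statement is the Claim_ definition above) =====
theorem areTheyGood_spec : Claim_equal_areTheyGood := by
  intro n1 n2 _ hpre
  unfold Spec_areTheyGood areTheyGood areTheyGood_alt
  dsimp only
  rw [count_eq_evenBase5 n1.toNat n1 0 le_rfl hpre.1,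
      count_eq_evenBase5 n2.toNat n2 0 le_rfl hpre.2]
  by_cases h : evenBase5Digits n1 0 = evenBase5Digits n2 0 <;> simp [h]
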